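-- pv_equiv track=rewrite | github.com/JadielTeofilo/General-Algorithms | src/leetcode/85_maximal_rectangle.py | build_cache
-- ===== SOURCE A (Python) =====
-- from typing import List
--
-- Matrix = List[List[str]]
--
-- Cache = List[List[int]]
--
-- def build_cache(matrix: Matrix) -> Cache:
--     cache: Cache = [[0] * len(matrix[0]) for _ in range(len(matrix))]
--     for row in range(len(matrix)):
--         for col in range(len(matrix[0])):
--             if row == 0 or matrix[row][col] == '0':
--                 cache[row][col] = int(matrix[row][col])
--                 continue
--             cache[row][col] = 1 + cache[row - 1][col]
--     return cache
-- ===== SOURCE B (Python) =====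
-- def build_cache(matrix):
--     width = len(matrix[0])
--     cols = []
--     for c in range(width):
--         streak = 0
--         vals = []
--         for r, row in enumerate(matrix):
--             if r == 0:
--                 streak = int(row[c])
--             elif row[c] == '0':
--                 streak = 0
--             else:
--                 streak = streak + 1
--             vals.append(streak)
--         cols.append(vals)
--     return [[cols[c][r] for c in range(width)] for r in range(len(matrix))]
-- ===== Notes on version B (the rewrite author's own statement) =====
-- stated objective: alternative
-- what changed: Replaces the row-major DP table with lookback cache[row-1][col] by a column-major pass keeping a scalar streak accumulator per column, building each column independently and assembling the row-major result at the end.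
-- outside the precondition, e.g. on build_cache([]): A returns [], B raises IndexError
import Mathlib
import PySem

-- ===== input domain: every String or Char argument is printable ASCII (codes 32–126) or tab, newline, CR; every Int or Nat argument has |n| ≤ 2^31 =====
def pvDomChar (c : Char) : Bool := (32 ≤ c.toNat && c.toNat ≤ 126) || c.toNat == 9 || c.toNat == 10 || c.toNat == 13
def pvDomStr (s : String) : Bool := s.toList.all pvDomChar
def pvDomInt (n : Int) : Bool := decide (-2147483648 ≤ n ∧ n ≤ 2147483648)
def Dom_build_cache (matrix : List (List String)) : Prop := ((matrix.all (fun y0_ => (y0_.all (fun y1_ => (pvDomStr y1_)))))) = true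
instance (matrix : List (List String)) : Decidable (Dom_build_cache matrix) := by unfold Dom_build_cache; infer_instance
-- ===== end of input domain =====

-- B replaces A's row-major DP lookback (cache[row-1][col]) by a column-major pass with a scalar streak accumulator per column; alternative decomposition, same cost.


-- ===== PORT A =====
-- literal transliteration of A: cache initialised to zeros, then nested row/col loops updating
-- cache in place; reads, writes and int() use pyGetD/pySetD/ofStr? with defaults, exact on
-- Pre_ (which rules out exactly the IndexError/ValueError inputs).
def build_cache (matrix : List (List String)) : List (List Int) :=
  let w := (PySem.List.pyGetD matrix 0 []).length
  let cache0 : List (List Int) :=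
    (PySem.List.pyRange 0 matrix.length 1).map (fun _ => PySem.List.pyRepeat [(0 : Int)] w)
  (PySem.List.pyRange 0 matrix.length 1).foldl (fun cache row =>
    (PySem.List.pyRange 0 w 1).foldl (fun cache col =>
      if row == 0 || PySem.List.pyGetD (PySem.List.pyGetD matrix row []) col "" == "0" then
        PySem.List.pySetD cache row
          (PySem.List.pySetD (PySem.List.pyGetD cache row []) col
            ((PySem.Int.ofStr? (PySem.List.pyGetD (PySem.List.pyGetD matrix row []) col "")).getD 0))
      else
        PySem.List.pySetD cache row
          (PySem.List.pySetD (PySem.List.pyGetD cache row []) col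
            (1 + PySem.List.pyGetD (PySem.List.pyGetD cache (row - 1) []) col 0))) cache) cache0

-- ===== PORT B =====
-- literal transliteration of Source B: per column, a fold over enumerate(matrix) carrying
-- (streak, vals); then the row-major assembly comprehension.
def build_cache_alt (matrix : List (List String)) : List (List Int) :=
  let w := (PySem.List.pyGetD matrix 0 []).length
  let cols : List (List Int) :=
    (PySem.List.pyRange 0 w 1).map (fun c =>
      ((PySem.List.enumerate matrix).foldl (fun (st : Int × List Int) p =>
        let streak :=
          if p.1 == 0 then (PySem.Int.ofStr? (PySem.List.pyGetD p.2 c "")).getD 0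
          else if PySem.List.pyGetD p.2 c "" == "0" then (0 : Int)
          else st.1 + 1
        (streak, st.2 ++ [streak])) ((0 : Int), ([] : List Int))).2)
  (PySem.List.pyRange 0 matrix.length 1).map (fun r =>
    (PySem.List.pyRange 0 w 1).map (fun c =>
      PySem.List.pyGetD (PySem.List.pyGetD cols c []) r 0))

-- ===== PRECONDITION & SPEC =====
-- Pre_ excludes the inputs where Python A raises — a row shorter than the first row
-- (IndexError) and first-row entries int() cannot parse (ValueError) — and the empty matrix,
-- where A's [] return is an accident of the comprehension never evaluating matrix[0] while B
-- computes the width first and raises IndexError.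
def Pre_build_cache (matrix : List (List String)) : Prop :=
  matrix ≠ [] ∧
  (∀ row ∈ matrix, (matrix.headD []).length ≤ row.length) ∧
  (∀ s ∈ matrix.headD [], (PySem.Int.ofStr? s).isSome = true)
instance (matrix : List (List String)) : Decidable (Pre_build_cache matrix) := by
  unfold Pre_build_cache; infer_instance
def pvWitness_build_cache : List (List String) := [["1", "0"], ["1", "1"], ["0", "1"]]
def Spec_build_cache (matrix : List (List String)) (out : List (List Int)) : Prop := out = build_cache_alt matrix
instance (matrix : List (List String)) (out : List (List Int)) : Decidable (Spec_build_cache matrix out) := by unfold Spec_build_cache; infer_instance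

-- ===== CLAIM (what is proved, stated in full; the proofs are below) =====
def Claim_equal_build_cache : Prop := ∀ (matrix : List (List String)), Dom_build_cache matrix → Pre_build_cache matrix → Spec_build_cache matrix (build_cache matrix)

-- ===== LEMMAS AND PROOFS =====

-- the common value both ports compute: pvV matrix r c = entry at row r, column c
def pvV (matrix : List (List String)) : Nat → Nat → Int
  | 0, c => (PySem.Int.ofStr? ((matrix.getD 0 []).getD c "")).getD 0
  | r + 1, c =>
      if (matrix.getD (r + 1) []).getD c "" == "0" then 0
      else pvV matrix r c + 1

def pvRowV (matrix : List (List String)) (w r : Nat) : List Int :=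
  (List.range w).map (fun c => pvV matrix r c)

def pvGrid (matrix : List (List String)) (w : Nat) : List (List Int) :=
  (List.range matrix.length).map (fun r => pvRowV matrix w r)

-- A's cache after the first k outer iterations: rows below k final, the rest still zero
def pvCacheAt (matrix : List (List String)) (w k : Nat) : List (List Int) :=
  (List.range matrix.length).map (fun r =>
    if r < k then pvRowV matrix w r else List.replicate w 0)

-- A's cache inside outer iteration k, after the first j inner iterations
def pvPartial (matrix : List (List String)) (w k j : Nat) : List (List Int) :=
  (List.range matrix.length).map (fun r =>
    if r < k then pvRowV matrix w r
    else if r = k then (List.range w).map (fun c => if c < j then pvV matrix r c else 0)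
    else List.replicate w 0)

-- the inner-loop body of port A, named so the fold lemmas can speak about it
def pvInner (matrix : List (List String)) (row : Int) :
    List (List Int) → Int → List (List Int) :=
  fun cache col =>
    if row == 0 || PySem.List.pyGetD (PySem.List.pyGetD matrix row []) col "" == "0" then
      PySem.List.pySetD cache row
        (PySem.List.pySetD (PySem.List.pyGetD cache row []) col
          ((PySem.Int.ofStr? (PySem.List.pyGetD (PySem.List.pyGetD matrix row []) col "")).getD 0))
    else
      PySem.List.pySetD cache row
        (PySem.List.pySetD (PySem.List.pyGetD cache row []) col
          (1 + PySem.List.pyGetD (PySem.List.pyGetD cache (row - 1) []) col 0))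

theorem pvPartial_zero (matrix : List (List String)) (w k : Nat) :
    pvPartial matrix w k 0 = pvCacheAt matrix w k := by
  unfold pvPartial pvCacheAt
  apply List.map_congr_left
  intro r _
  by_cases h1 : r < k
  · simp [h1]
  · by_cases h2 : r = k <;> simp [h1, h2, List.map_const']

theorem pvPartial_last (matrix : List (List String)) (w k : Nat) :
    pvPartial matrix w k w = pvCacheAt matrix w (k + 1) := by
  unfold pvPartial pvCacheAt
  apply List.map_congr_left
  intro r _
  by_cases h1 : r < k
  · simp [h1, show r < k + 1 by omega]
  · by_cases h2 : r = k
    · subst h2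
      simp only [h1, if_false, Nat.lt_succ_self, if_true]
      unfold pvRowV
      apply List.map_congr_left
      intro c hc
      simp [List.mem_range.mp hc]
    · simp [h1, h2, show ¬ (r < k + 1) by omega]

theorem pvPartial_getD (matrix : List (List String)) (w k j : Nat)
    (hk : k < matrix.length) :
    (pvPartial matrix w k j).getD k [] =
      (List.range w).map (fun c => if c < j then pvV matrix k c else 0) := by
  unfold pvPartial
  rw [PySem.List.getD_map_range _ _ _ _ hk]
  simp

theorem pvPartial_getD_lt (matrix : List (List String)) (w k j s : Nat)
    (hs : s < k) (hk : k < matrix.length) :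
    (pvPartial matrix w k j).getD s [] = pvRowV matrix w s := by
  unfold pvPartial
  rw [PySem.List.getD_map_range _ _ _ _ (by omega)]
  simp [hs]

-- writing pvV matrix k j into row k, column j advances the partial state by one column
theorem pvPartial_set (matrix : List (List String)) (w k j : Nat)
    (hk : k < matrix.length) (hj : j < w) :
    (pvPartial matrix w k j).set k
        (((pvPartial matrix w k j).getD k []).set j (pvV matrix k j)) =
      pvPartial matrix w k (j + 1) := by
  rw [pvPartial_getD matrix w k j hk]
  apply List.ext_getElem
  · simp [pvPartial]
  · intro r hr hr'
    rw [List.getElem_set]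
    by_cases hkr : k = r
    · subst hkr
      rw [if_pos rfl]
      have hrhs : (pvPartial matrix w k (j + 1))[k]'hr' =
          (List.range w).map (fun c => if c < j + 1 then pvV matrix k c else 0) := by
        simp only [pvPartial, List.getElem_map, List.getElem_range]
        rw [if_neg (by omega : ¬ (k < k))]
        simp
      rw [hrhs]
      apply List.ext_getElem
      · simp
      · intro c hc hc'
        rw [List.getElem_set]
        simp only [List.getElem_map, List.getElem_range]
        by_cases hjc : j = c
        · subst hjc
          rw [if_pos rfl, if_pos (by omega : j < j + 1)]
        · rw [if_neg hjc]
          by_cases hcj : c < j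
          · rw [if_pos hcj, if_pos (by omega : c < j + 1)]
          · rw [if_neg hcj, if_neg (by omega : ¬ (c < j + 1))]
    · rw [if_neg hkr]
      simp only [pvPartial, List.getElem_map, List.getElem_range]
      have hne : ¬ (r = k) := fun h => hkr h.symm
      rcases Nat.lt_or_ge r k with h | h
      · rw [if_pos h, if_pos h]
      · have hrk : ¬ (r < k) := by omega
        rw [if_neg hrk, if_neg hne, if_neg hrk, if_neg hne]

-- one inner-loop step of port A writes pvV matrix k j
theorem pvInner_step (matrix : List (List String)) (w k j : Nat)
    (hk : k < matrix.length) (hj : j < w) :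
    pvInner matrix (k : Int) (pvPartial matrix w k j) (j : Int) =
      pvPartial matrix w k (j + 1) := by
  unfold pvInner
  simp only [PySem.List.pyGetD_natCast]
  match k, hk with
  | 0, hk =>
    rw [if_pos (by simp)]
    rw [PySem.List.pySetD_natCast, PySem.List.pySetD_natCast]
    have hv : ((PySem.Int.ofStr? ((matrix.getD 0 []).getD j "")).getD 0) = pvV matrix 0 j := rfl
    rw [hv]
    exact pvPartial_set matrix w 0 j hk hj
  | s + 1, hk =>
    have h0 : (((s + 1 : Nat) : Int) == 0) = false := by
      simp only [beq_eq_false_iff_ne]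
      omega
    rw [h0, Bool.false_or]
    by_cases hc : ((matrix.getD (s + 1) []).getD j "" == "0") = true
    · rw [if_pos hc]
      rw [PySem.List.pySetD_natCast, PySem.List.pySetD_natCast]
      have hcell : (matrix.getD (s + 1) []).getD j "" = "0" := by simpa using hc
      have hv : ((PySem.Int.ofStr? ((matrix.getD (s + 1) []).getD j "")).getD 0) =
          pvV matrix (s + 1) j := by
        rw [hcell, pvV, hcell]
        simp only [beq_self_eq_true, if_true]
        decide
      rw [hv]
      exact pvPartial_set matrix w (s + 1) j hk hj
    · rw [if_neg hc]
      rw [PySem.List.pySetD_natCast, PySem.List.pySetD_natCast]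
      have hsub : ((s + 1 : Nat) : Int) - 1 = ((s : Nat) : Int) := by push_cast; ring
      rw [hsub]
      simp only [PySem.List.pyGetD_natCast]
      rw [pvPartial_getD_lt matrix w (s + 1) j s (by omega) hk]
      have hrow : (pvRowV matrix w s).getD j 0 = pvV matrix s j := by
        unfold pvRowV
        exact PySem.List.getD_map_range _ _ _ _ hj
      rw [hrow]
      have hv : 1 + pvV matrix s j = pvV matrix (s + 1) j := by
        rw [pvV, if_neg hc]
        ring
      rw [hv]
      exact pvPartial_set matrix w (s + 1) j hk hj

-- the inner loop of port A, run from column j, completes row k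
theorem pvInner_fold (matrix : List (List String)) (w k : Nat)
    (hk : k < matrix.length) :
    ∀ (j : Nat), j ≤ w →
      (PySem.List.pyRange (j : Int) (w : Int) 1).foldl (pvInner matrix (k : Int))
          (pvPartial matrix w k j) =
        pvPartial matrix w k w := by
  intro j
  induction hd : w - j generalizing j with
  | zero =>
    intro _
    have : j = w := by omega
    subst this
    rw [PySem.List.pyRange_one_eq_nil (le_refl _)]
    rfl
  | succ m ih =>
    intro hj
    have hjw : j < w := by omega
    rw [PySem.List.pyRange_one_cons (show (j : Int) < (w : Int) by exact_mod_cast hjw), List.foldl_cons]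
    rw [pvInner_step matrix w k j hk hjw]
    have hcast : ((j : Int) + 1) = ((j + 1 : Nat) : Int) := by push_cast; ring
    rw [hcast]
    exact ih (j + 1) (by omega) (by omega)

-- the outer loop of port A, run from row k, completes the whole cache
theorem pvOuter_fold (matrix : List (List String)) (w : Nat) :
    ∀ (k : Nat), k ≤ matrix.length →
      (PySem.List.pyRange (k : Int) (matrix.length : Int) 1).foldl
          (fun cache row => (PySem.List.pyRange 0 (w : Int) 1).foldl (pvInner matrix row) cache)
          (pvCacheAt matrix w k) =
        pvCacheAt matrix w matrix.length := by
  intro k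
  induction hd : matrix.length - k generalizing k with
  | zero =>
    intro hk
    have : k = matrix.length := by omega
    subst this
    rw [PySem.List.pyRange_one_eq_nil (le_refl _)]
    rfl
  | succ m ih =>
    intro hk
    have hkn : k < matrix.length := by omega
    rw [PySem.List.pyRange_one_cons
      (show (k : Int) < (matrix.length : Int) by exact_mod_cast hkn), List.foldl_cons]
    have hin := pvInner_fold matrix w k hkn 0 (by omega)
    rw [Nat.cast_zero] at hin
    have hfold :
        (PySem.List.pyRange 0 (w : Int) 1).foldl (pvInner matrix (k : Int)) (pvCacheAt matrix w k) =
          pvPartial matrix w k w := by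
      rw [← pvPartial_zero matrix w k]
      exact hin
    rw [hfold, pvPartial_last matrix w k]
    have hcast : ((k : Int) + 1) = ((k + 1 : Nat) : Int) := by push_cast; ring
    rw [hcast]
    exact ih (k + 1) (by omega) (by omega)

theorem pvCacheAt_zero (matrix : List (List String)) (w : Nat) :
    pvCacheAt matrix w 0 = List.replicate matrix.length (List.replicate w 0) := by
  unfold pvCacheAt
  simp [List.map_const']

theorem build_cache_eq_grid (matrix : List (List String)) :
    build_cache matrix = pvGrid matrix (PySem.List.pyGetD matrix 0 []).length := by
  set w := (PySem.List.pyGetD matrix 0 []).length with hw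
  have h1 : build_cache matrix =
      (PySem.List.pyRange 0 (matrix.length : Int) 1).foldl
        (fun cache row => (PySem.List.pyRange 0 (w : Int) 1).foldl (pvInner matrix row) cache)
        ((PySem.List.pyRange 0 (matrix.length : Int) 1).map
          (fun _ => PySem.List.pyRepeat [(0 : Int)] (w : Int))) := rfl
  rw [h1]
  have h2 : (PySem.List.pyRange 0 (matrix.length : Int) 1).map
      (fun _ => PySem.List.pyRepeat [(0 : Int)] (w : Int)) = pvCacheAt matrix w 0 := by
    rw [pvCacheAt_zero, List.map_const']
    simp [PySem.List.pyRepeat_singleton, PySem.List.length_pyRange_one]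
  rw [h2]
  have hout := pvOuter_fold matrix w 0 (by omega)
  rw [Nat.cast_zero] at hout
  rw [hout]
  unfold pvCacheAt pvGrid
  apply List.map_congr_left
  intro r hr
  simp [List.mem_range.mp hr]

-- the per-column fold body of port B, named so the fold lemma can speak about it
def pvColBody (c : Int) : Int × List Int → Int × List String → Int × List Int :=
  fun st p =>
    let streak :=
      if p.1 == 0 then (PySem.Int.ofStr? (PySem.List.pyGetD p.2 c "")).getD 0
      else if PySem.List.pyGetD p.2 c "" == "0" then (0 : Int)
      else st.1 + 1
    (streak, st.2 ++ [streak])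

-- B's per-column fold, started at row k with the previous streak, appends the tail of the column
theorem pvColBody_fold (matrix : List (List String)) (c : Nat) :
    ∀ (k : Nat) (st : Int) (acc : List Int), k ≤ matrix.length →
      (0 < k → st = pvV matrix (k - 1) c) →
      ((PySem.List.enumerate (matrix.drop k) (k : Int)).foldl (pvColBody (c : Int)) (st, acc)).2 =
        acc ++ (List.range' k (matrix.length - k)).map (fun r => pvV matrix r c) := by
  intro k st acc
  induction hd : matrix.length - k generalizing k st acc with
  | zero =>
    intro hk _
    have : k = matrix.length := by omega
    subst this
    simp [List.drop_length, PySem.List.enumerate_nil]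
  | succ m ih =>
    intro hk hst
    have hkn : k < matrix.length := by omega
    rw [List.drop_eq_getElem_cons hkn, PySem.List.enumerate_cons, List.foldl_cons]
    have hcell : PySem.List.pyGetD matrix[k] (c : Int) "" = (matrix.getD k []).getD c "" := by
      rw [PySem.List.pyGetD_natCast, List.getD_eq_getElem matrix [] hkn]
    have hstep : pvColBody (c : Int) (st, acc) ((k : Int), matrix[k]) =
        (pvV matrix k c, acc ++ [pvV matrix k c]) := by
      simp only [pvColBody, hcell]
      match k, hst with
      | 0, _ =>
        simp only [Nat.cast_zero, beq_self_eq_true, if_true]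
        rfl
      | s + 1, hst =>
        have h0 : (((s + 1 : Nat) : Int) == 0) = false := by
          simp only [beq_eq_false_iff_ne]
          omega
        rw [h0]
        have hst' : st = pvV matrix s c := by simpa using hst (by omega)
        rw [if_neg (by simp), hst']
        by_cases hc : ((matrix.getD (s + 1) []).getD c "" == "0") = true
        · simp only [pvV, hc, if_true]
        · simp only [Bool.not_eq_true] at hc
          simp only [pvV, hc, Bool.false_eq_true, if_false]
    rw [hstep]
    have hcast : ((k : Int) + 1) = ((k + 1 : Nat) : Int) := by push_cast; ring
    rw [hcast]
    rw [ih (k + 1) (pvV matrix k c) (acc ++ [pvV matrix k c]) (by omega) (by omega) (by intro _; simp)]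
    rw [List.range'_succ]
    simp

theorem build_cache_alt_eq_grid (matrix : List (List String)) :
    build_cache_alt matrix = pvGrid matrix (PySem.List.pyGetD matrix 0 []).length := by
  set w := (PySem.List.pyGetD matrix 0 []).length with hw
  have h1 : build_cache_alt matrix =
      (PySem.List.pyRange 0 (matrix.length : Int) 1).map (fun r =>
        (PySem.List.pyRange 0 (w : Int) 1).map (fun c =>
          PySem.List.pyGetD
            (PySem.List.pyGetD
              ((PySem.List.pyRange 0 (w : Int) 1).map (fun cc =>
                ((PySem.List.enumerate matrix 0).foldl (pvColBody cc) ((0 : Int), ([] : List Int))).2))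
              c [])
            r 0)) := rfl
  rw [h1]
  have hcol : ∀ (cc : Nat),
      ((PySem.List.enumerate matrix 0).foldl (pvColBody (cc : Int)) ((0 : Int), ([] : List Int))).2 =
        (List.range matrix.length).map (fun r => pvV matrix r cc) := by
    intro cc
    have h0 : (PySem.List.enumerate matrix 0) =
        (PySem.List.enumerate (matrix.drop 0) ((0 : Nat) : Int)) := by simp
    rw [h0, pvColBody_fold matrix cc 0 0 [] (by omega) (by omega)]
    simp [List.range_eq_range']
  rw [PySem.List.pyRange_zero_natCast matrix.length, PySem.List.pyRange_zero_natCast w]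
  simp only [List.map_map]
  unfold pvGrid
  apply List.map_congr_left
  intro r hr
  have hrn : r < matrix.length := List.mem_range.mp hr
  unfold pvRowV
  apply List.map_congr_left
  intro c hc
  have hcw : c < w := List.mem_range.mp hc
  simp only [Function.comp_apply]
  simp only [PySem.List.pyGetD_natCast]
  rw [PySem.List.getD_map_range _ _ _ _ hcw]
  simp only [Function.comp_apply]
  rw [hcol c]
  exact PySem.List.getD_map_range _ _ _ _ hrn

-- ===== VERDICT (by name: the statement is the Claim_ definition above) =====
theorem build_cache_spec : Claim_equal_build_cache := by
  intro matrix _ _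
  unfold Spec_build_cache
  rw [build_cache_eq_grid, build_cache_alt_eq_grid]
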